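-- pv_equiv track=rewrite | github.com/Abhisek1994Roy/PythonAlgorithmicProblems | Hacker_Rank_Problems/test.py | whoIsTheWinner
-- ===== SOURCE A (Python) =====
-- import collections
--
-- def check_order(arr):
--     if len(arr)==len(set(arr)):
--         return True
--     else:
--         return False
--
-- def count_frequency(arr):
--     return collections.Counter(arr)
--
-- def whoIsTheWinner(arr):
--     if check_order(arr):
--         return "First"
--     arr_freq = count_frequency(arr)
--     singles = 0
--     multiples = 0
--     for i in arr_freq:
--         if arr_freq[i]>1:
--             multiples +=arr_freq[i]
--         else:
--             singles+=1
--     start = True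
--     if singles%2==0:
--         start = not start
--     if multiples%2!=0:
--         start = not start
--     if start == True:
--         return "First"
--     else:
--         return "Second"
-- ===== SOURCE B (Python) =====
-- def whoIsTheWinner(arr):
--     b = sorted(arr)
--     if all(x != y for x, y in zip(b, b[1:])):
--         return "First"
--     return "First" if len(arr) % 2 == 1 else "Second"
-- ===== Notes on version B (the rewrite author's own statement) =====
-- stated objective: simpler
-- what changed: B replaces the set/Counter frequency tally and the singles/multiples parity dance with a sort-and-scan: sorted copy, adjacent-duplicate check for the all-distinct shortcut, and otherwise just the parity of len(arr), since A's singles+multiples always sums to len(arr).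
import Mathlib
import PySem

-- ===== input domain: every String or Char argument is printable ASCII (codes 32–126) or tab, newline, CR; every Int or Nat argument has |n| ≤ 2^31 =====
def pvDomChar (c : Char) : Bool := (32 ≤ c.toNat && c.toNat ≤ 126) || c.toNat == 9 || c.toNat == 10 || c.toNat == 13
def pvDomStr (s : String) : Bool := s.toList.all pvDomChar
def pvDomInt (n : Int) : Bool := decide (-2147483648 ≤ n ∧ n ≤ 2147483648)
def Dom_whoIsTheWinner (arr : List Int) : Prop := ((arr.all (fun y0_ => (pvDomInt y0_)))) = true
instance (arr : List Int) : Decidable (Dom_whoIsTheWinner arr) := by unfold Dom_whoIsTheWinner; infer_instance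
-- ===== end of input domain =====

-- B sorts a copy and decides by adjacent duplicates plus the parity of len(arr);
-- A's singles/multiples parity dance reduces to exactly that (singles+multiples = len(arr)).

-- ===== PORT A =====
def check_order (arr : List Int) : Bool :=
  if arr.length == (PySem.Set.ofList arr).length then true else false

def count_frequency (arr : List Int) : PySem.Dict Int Int :=
  PySem.Dict.counter arr

def whoIsTheWinner (arr : List Int) : String :=
  if check_order arr then "First"
  else
    let arr_freq := count_frequency arr
    let sm := arr_freq.keys.foldl (fun (p : Int × Int) i =>
        if arr_freq.getD i 0 > 1 then (p.1, p.2 + arr_freq.getD i 0) else (p.1 + 1, p.2))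
        ((0 : Int), (0 : Int))
    let start := true
    let start := if PySem.Int.mod sm.1 2 == 0 then !start else start
    let start := if PySem.Int.mod sm.2 2 != 0 then !start else start
    if start = true then "First" else "Second"

-- ===== PORT B =====
def whoIsTheWinner_alt (arr : List Int) : String :=
  let b := PySem.List.sorted arr (fun x => x) false
  if (b.zip (PySem.List.slice b (some 1) none)).all (fun p => p.1 != p.2) then "First"
  else if arr.length % 2 == 1 then "First" else "Second"

-- ===== PRECONDITION & SPEC =====
def Spec_whoIsTheWinner (arr : List Int) (out : String) : Prop := out = whoIsTheWinner_alt arr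
instance (arr : List Int) (out : String) : Decidable (Spec_whoIsTheWinner arr out) := by unfold Spec_whoIsTheWinner; infer_instance

-- ===== CLAIM (what is proved, stated in full; the proofs are below) =====
def Claim_equal_whoIsTheWinner : Prop := ∀ (arr : List Int), Dom_whoIsTheWinner arr → Spec_whoIsTheWinner arr (whoIsTheWinner arr)

-- ===== LEMMAS AND PROOFS =====

-- A's check: len(arr) == len(set(arr)) holds exactly on duplicate-free lists
lemma check_order_iff (arr : List Int) : check_order arr = true ↔ arr.Nodup := by
  unfold check_order
  constructor
  · intro h
    by_cases hlen : arr.length = (PySem.Set.ofList arr).length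
    · -- ofList ~ dedup, dedup sublist of arr with equal length forces dedup = arr
      have hperm : (PySem.Set.ofList arr).Perm arr.dedup := by
        refine (List.perm_ext_iff_of_nodup (PySem.Set.nodup_ofList arr) arr.nodup_dedup).mpr ?_
        intro a; simp [PySem.Set.mem_ofList, List.mem_dedup]
      have h2 : arr.dedup.length = arr.length := by
        rw [← hperm.length_eq, ← hlen]
      have := List.Sublist.eq_of_length arr.dedup_sublist h2
      rw [← this]; exact arr.nodup_dedup
    · simp [hlen] at h
  · intro h
    have := PySem.Set.ofList_eq_self_of_nodup arr h
    simp [this]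

-- B's check: on a ≤-sorted list, no two adjacent elements equal ↔ no duplicates at all
lemma adj_ne_iff (l : List Int) (hp : l.Pairwise (· ≤ ·)) :
    ((l.zip l.tail).all (fun p => p.1 != p.2)) = true ↔ l.Nodup := by
  induction l with
  | nil => simp
  | cons a t ih =>
    cases t with
    | nil => simp
    | cons b u =>
      have hp' : (b :: u).Pairwise (· ≤ ·) := hp.tail
      have hab : a ≤ b := (List.pairwise_cons.mp hp).1 b (by simp)
      have hau : ∀ x ∈ u, a ≤ x := fun x hx => (List.pairwise_cons.mp hp).1 x (by simp [hx])
      have hbu : ∀ x ∈ u, b ≤ x := fun x hx => (List.pairwise_cons.mp hp').1 x hx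
      constructor
      · intro h
        simp only [List.tail_cons, List.zip_cons_cons, List.all_cons, Bool.and_eq_true,
          bne_iff_ne, ne_eq] at h
        obtain ⟨hne, hrest⟩ := h
        have htn : (b :: u).Nodup := (ih hp').mp (by simpa using hrest)
        refine List.nodup_cons.mpr ⟨?_, htn⟩
        intro hmem
        rcases List.mem_cons.mp hmem with h1 | h1
        · exact hne h1
        · exact hne (le_antisymm hab (le_trans (hbu a h1) (le_of_eq rfl)))
      · intro h
        have hne : a ≠ b := fun e => (List.nodup_cons.mp h).1 (e ▸ List.mem_cons_self ..)
        have := (ih hp').mpr (List.nodup_cons.mp h).2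
        simp only [List.tail_cons, List.zip_cons_cons, List.all_cons, Bool.and_eq_true,
          bne_iff_ne, ne_eq]
        exact ⟨hne, by simpa using this⟩

-- splitting a mapped sum along a Boolean predicate
lemma pv_sum_filter_split (p : Int → Bool) (f : Int → Int) (l : List Int) :
    ((l.filter p).map f).sum + ((l.filter (fun x => !p x)).map f).sum = (l.map f).sum := by
  induction l with
  | nil => simp
  | cons a t ih =>
    by_cases h : p a = true
    · simp [h, ← ih]; ring
    · simp only [Bool.not_eq_true] at h
      simp [h, ← ih]; ring

-- the counts of the distinct elements sum to the length
lemma pv_count_sum (arr : List Int) :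
    ((PySem.Set.ofList arr).map (fun k => (arr.count k : Int))).sum = (arr.length : Int) := by
  have hperm : (PySem.Set.ofList arr).Perm arr.dedup := by
    refine (List.perm_ext_iff_of_nodup (PySem.Set.nodup_ofList arr) arr.nodup_dedup).mpr ?_
    intro a; simp [PySem.Set.mem_ofList, List.mem_dedup]
  have := (hperm.map (fun k => (arr.count k : Int))).sum_eq
  rw [this]
  have : ((arr.dedup.map (fun k => (arr.count k : Int)))).sum
      = ((arr.dedup.map (fun k => arr.count k)).sum : Int) := by
    push_cast; rw [List.map_map]; rfl
  rw [this, List.sum_map_count_dedup_eq_length]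

-- A's loop, with a generalized accumulator
lemma pv_loop_eq (arr : List Int) : ∀ (S : List Int) (a b : Int),
    (S.foldl (fun (p : Int × Int) i =>
        if (arr.count i : Int) > 1 then (p.1, p.2 + (arr.count i : Int))
        else (p.1 + 1, p.2)) (a, b))
      = (a + (S.countP (fun i => !decide (1 < arr.count i)) : Int),
         b + ((S.filter (fun i => decide (1 < arr.count i))).map
            (fun k => (arr.count k : Int))).sum) := by
  intro S
  induction S with
  | nil => intro a b; simp
  | cons x t ih =>
    intro a b
    rw [List.foldl_cons]
    by_cases h : (arr.count x : Int) > 1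
    · have h' : 1 < arr.count x := by exact_mod_cast h
      rw [if_pos h, ih, Prod.mk.injEq]
      refine ⟨by simp [h'], ?_⟩
      simp only [List.filter_cons, decide_eq_true h', if_true, List.map_cons, List.sum_cons]
      ring
    · have h' : ¬ (1 < arr.count x) := by exact_mod_cast h
      rw [if_neg h, ih, Prod.mk.injEq]
      refine ⟨?_, by simp [h']⟩
      simp [h']
      ring

-- singles + multiples = len(arr)
lemma pv_sm_sum (arr : List Int) :
    ((PySem.Set.ofList arr).countP (fun i => !decide (1 < arr.count i)) : Int)
      + (((PySem.Set.ofList arr).filter (fun i => decide (1 < arr.count i))).map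
          (fun k => (arr.count k : Int))).sum = (arr.length : Int) := by
  set S := PySem.Set.ofList arr with hS
  set p := fun i => decide (1 < arr.count i) with hp
  have hones : ((S.filter (fun x => !p x)).map (fun k => (arr.count k : Int)))
      = ((S.filter (fun x => !p x)).map (fun _ => (1 : Int))) := by
    apply List.map_congr_left
    intro a ha
    have haS : a ∈ S := List.mem_of_mem_filter ha
    have hmem : a ∈ arr := by
      rw [hS, PySem.Set.mem_ofList] at haS; exact haS
    have hpos : 1 ≤ arr.count a := List.one_le_count_iff.mpr hmem
    have hle : ¬ (1 < arr.count a) := by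
      have := List.of_mem_filter ha
      simpa [hp] using this
    have : arr.count a = 1 := by omega
    simp [this]
  have hcount : (S.countP (fun x => !p x) : Int)
      = ((S.filter (fun x => !p x)).map (fun k => (arr.count k : Int))).sum := by
    rw [hones]; simp [List.countP_eq_length_filter]
  rw [hcount, add_comm, pv_sum_filter_split p (fun k => (arr.count k : Int)) S]
  exact pv_count_sum arr

-- ===== VERDICT (by name: the statement is the Claim_ definition above) =====
theorem whoIsTheWinner_spec : Claim_equal_whoIsTheWinner := by
  intro arr _
  unfold Spec_whoIsTheWinner
  have hsortp : (PySem.List.sorted arr (fun x => x) false).Pairwise (· ≤ ·) := by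
    simpa using PySem.List.sorted_pairwise arr (fun x => x)
  have hsperm : (PySem.List.sorted arr (fun x => x) false).Perm arr :=
    PySem.List.sorted_perm arr (fun x => x) false
  have hslice : PySem.List.slice (PySem.List.sorted arr (fun x => x) false) (some 1) none
      = (PySem.List.sorted arr (fun x => x) false).tail := PySem.List.slice_from_one _
  by_cases hnd : arr.Nodup
  · simp [whoIsTheWinner, whoIsTheWinner_alt, hslice, (check_order_iff arr).mpr hnd,
      (adj_ne_iff _ hsortp).mpr (hsperm.nodup_iff.mpr hnd)]
  · have hco : ¬ (check_order arr = true) := fun h => hnd ((check_order_iff arr).mp h)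
    have hadj : ¬ ((((PySem.List.sorted arr (fun x => x) false).zip
        (PySem.List.sorted arr (fun x => x) false).tail).all (fun p => p.1 != p.2)) = true) :=
      fun h => hnd (hsperm.nodup_iff.mp ((adj_ne_iff _ hsortp).mp h))
    simp only [whoIsTheWinner, whoIsTheWinner_alt, count_frequency, hslice,
      PySem.Dict.keys_counter, if_neg hco, if_neg hadj, PySem.Dict.getD_counter,
      pv_loop_eq arr, zero_add]
    have hsum := pv_sm_sum arr
    set s : Int := ((PySem.Set.ofList arr).countP (fun i => !decide (1 < arr.count i)) : Int) with hs
    set m : Int := (((PySem.Set.ofList arr).filter (fun i => decide (1 < arr.count i))).map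
        (fun k => (arr.count k : Int))).sum with hm
    simp only [PySem.Int.mod_eq_emod_of_pos (by norm_num : (0:Int) < 2)]
    by_cases h1 : s % 2 = 0 <;> by_cases h2 : m % 2 = 0
    · have hn : arr.length % 2 = 0 := by omega
      simp [h1, h2, hn]
    · have hn : arr.length % 2 = 1 := by omega
      simp [h1, h2, hn]
    · have hn : arr.length % 2 = 1 := by omega
      simp [h1, h2, hn]
    · have hn : arr.length % 2 = 0 := by omega
      simp [h1, h2, hn]
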